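-- pv_equiv track=rewrite | github.com/mohamad-amin/ntk-lookahead-active-learning | src/utils/neural_utils.py | get_res_batch_dims
-- ===== SOURCE A (Python) =====
-- from typing import Any, Callable, Iterable, List, Optional, Sequence, Sized, Tuple, Union
--
-- def get_res_batch_dims(contracting_dims: Iterable[int],
--                        batch_dims: Iterable[int]) -> List[int]:
--   res_batch_dims = [2 * b - i for i, b in enumerate(batch_dims)]
--   for i, b in enumerate(batch_dims):
--     for c in contracting_dims:
--       if b > c:
--         res_batch_dims[i] -= 2
--   return res_batch_dims
-- ===== SOURCE B (Python) =====
-- def get_res_batch_dims(contracting_dims, batch_dims):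
--   cs = sorted(contracting_dims)
--
--   def bisect_left(a, x):
--     # count of elements < x in the sorted list a (CPython's bisect_left loop)
--     lo, hi = 0, len(a)
--     while lo < hi:
--       mid = (lo + hi) // 2
--       if a[mid] < x:
--         lo = mid + 1
--       else:
--         hi = mid
--     return lo
--
--   return [2 * b - i - 2 * bisect_left(cs, b) for i, b in enumerate(batch_dims)]
-- ===== Notes on version B (the rewrite author's own statement) =====
-- stated objective: faster
-- what changed: Instead of a nested scan of contracting_dims for every batch dim with in-place decrements, B sorts contracting_dims once and binary-searches (bisect_left) the count of smaller contracting dims for each batch dim, building the result in one comprehension.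
import Mathlib
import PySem

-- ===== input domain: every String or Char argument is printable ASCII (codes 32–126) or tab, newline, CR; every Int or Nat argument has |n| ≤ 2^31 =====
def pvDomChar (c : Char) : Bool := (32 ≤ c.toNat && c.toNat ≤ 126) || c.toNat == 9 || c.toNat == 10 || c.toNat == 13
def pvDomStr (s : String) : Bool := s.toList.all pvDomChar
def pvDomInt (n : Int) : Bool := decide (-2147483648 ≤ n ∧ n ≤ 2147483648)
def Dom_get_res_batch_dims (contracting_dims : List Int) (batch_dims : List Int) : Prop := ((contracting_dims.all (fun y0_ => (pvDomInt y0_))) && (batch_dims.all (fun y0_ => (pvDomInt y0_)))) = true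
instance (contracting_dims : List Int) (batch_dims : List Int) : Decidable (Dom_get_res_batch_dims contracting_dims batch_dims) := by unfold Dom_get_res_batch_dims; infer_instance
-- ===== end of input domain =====

-- B sorts contracting_dims once and bisects the count of smaller contracting dims per batch dim
-- (one comprehension) instead of A's nested decrement loops; proved to return the same list.


-- ===== PORT A =====
-- literal transliteration: build [2*b - i], then the nested loops decrement res[i] by 2
-- for every contracting dim c with b > c (index i is always in range, so set/getD are exact)
def get_res_batch_dims (contracting_dims : List Int) (batch_dims : List Int) : List Int :=
  let res_batch_dims := (PySem.List.enumerate batch_dims).map (fun p => 2 * p.2 - p.1)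
  (PySem.List.enumerate batch_dims).foldl
    (fun res p =>
      contracting_dims.foldl
        (fun r c => if p.2 > c then r.set p.1.toNat (r.getD p.1.toNat 0 - 2) else r) res)
    res_batch_dims

-- ===== PORT B =====
-- transliteration of Source B: cs = sorted(contracting_dims); the hand-written bisect_left helper
-- is CPython's bisect_left loop, ported as the prelude primitive PySem.List.bisectLeft (same loop)
def get_res_batch_dims_alt (contracting_dims : List Int) (batch_dims : List Int) : List Int :=
  let cs := PySem.List.sorted contracting_dims (fun x => x) false
  (PySem.List.enumerate batch_dims).map
    (fun p => 2 * p.2 - p.1 - 2 * ((PySem.List.bisectLeft cs p.2 : Nat) : Int))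

-- ===== PRECONDITION & SPEC =====
def Spec_get_res_batch_dims (contracting_dims : List Int) (batch_dims : List Int) (out : List Int) : Prop := out = get_res_batch_dims_alt contracting_dims batch_dims
instance (contracting_dims : List Int) (batch_dims : List Int) (out : List Int) : Decidable (Spec_get_res_batch_dims contracting_dims batch_dims out) := by unfold Spec_get_res_batch_dims; infer_instance

-- ===== CLAIM (what is proved, stated in full; the proofs are below) =====
def Claim_equal_get_res_batch_dims : Prop := ∀ (contracting_dims : List Int) (batch_dims : List Int), Dom_get_res_batch_dims contracting_dims batch_dims → Spec_get_res_batch_dims contracting_dims batch_dims (get_res_batch_dims contracting_dims batch_dims)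

-- ===== LEMMAS AND PROOFS =====

-- A's inner loop over contracting_dims only touches index i: it subtracts 2·(count of c < b)
lemma inner_foldl (cd : List Int) (b : Int) (i : Nat) :
    ∀ (res : List Int), i < res.length →
      cd.foldl (fun r c => if b > c then r.set i (r.getD i 0 - 2) else r) res
        = res.set i (res.getD i 0 - 2 * (cd.countP (fun c => decide (b > c)) : Int)) := by
  induction cd with
  | nil =>
      intro res h
      simp only [List.foldl_nil, List.countP_nil, Nat.cast_zero, mul_zero, sub_zero]
      rw [List.getD_eq_getElem _ _ h, List.set_getElem_self h]
  | cons c cs ih =>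
      intro res h
      by_cases hb : b > c
      · simp only [List.foldl_cons, if_pos hb]
        rw [ih _ (by simpa using h)]
        rw [List.set_set]
        have hgd : (res.set i (res.getD i 0 - 2)).getD i 0 = res.getD i 0 - 2 := by
          rw [List.getD_eq_getElem _ _ (by simpa using h)]
          simp [List.getElem_set_self, h]
        rw [hgd, List.countP_cons]
        simp only [hb, decide_true, if_pos]
        congr 1
        push_cast
        ring
      · simp only [List.foldl_cons, if_neg hb]
        rw [ih _ h, List.countP_cons]
        simp [hb]

-- A's outer loop writes position i = pre.length, pre.length+1, … exactly once each
lemma outer_foldl (cd : List Int) :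
    ∀ (l : List Int) (pre mid : List Int), mid.length = l.length →
      (PySem.List.enumerate l (pre.length : Int)).foldl
        (fun res p =>
          cd.foldl
            (fun r c => if p.2 > c then r.set p.1.toNat (r.getD p.1.toNat 0 - 2) else r) res)
        (pre ++ mid)
      = pre ++ (mid.zip l).map (fun q => q.1 - 2 * (cd.countP (fun c => decide (q.2 > c)) : Int)) := by
  intro l
  induction l with
  | nil =>
      intro pre mid hlen
      have : mid = [] := List.eq_nil_of_length_eq_zero (by simpa using hlen)
      subst this
      simp [PySem.List.enumerate_nil]
  | cons x xs ih =>
      intro pre mid hlen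
      match mid with
      | [] => simp at hlen
      | m :: ms =>
        have hms : ms.length = xs.length := by simpa using hlen
        rw [PySem.List.enumerate_cons, List.foldl_cons]
        have hstep :
            cd.foldl
              (fun r c => if x > c then
                  r.set ((pre.length : Int)).toNat (r.getD ((pre.length : Int)).toNat 0 - 2) else r)
              (pre ++ m :: ms)
            = pre ++ (m - 2 * (cd.countP (fun c => decide (x > c)) : Int)) :: ms := by
          have h1 : ((pre.length : Int)).toNat = pre.length := by simp
          rw [h1]
          rw [inner_foldl cd x pre.length (pre ++ m :: ms) (by simp)]
          have hgd : (pre ++ m :: ms).getD pre.length 0 = m := by simp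
          have hset : (pre ++ m :: ms).set pre.length (m - 2 * (cd.countP (fun c => decide (x > c)) : Int)) = pre ++ (m - 2 * (cd.countP (fun c => decide (x > c)) : Int)) :: ms := by
            simp
          rw [hgd, hset]
        rw [hstep]
        have hpre : ((pre.length : Int)) + 1 = (((pre ++ [m - 2 * (cd.countP (fun c => decide (x > c)) : Int)]).length : Int)) := by
          simp
        rw [hpre]
        have := ih (pre ++ [m - 2 * (cd.countP (fun c => decide (x > c)) : Int)]) ms hms
        rw [show pre ++ (m - 2 * (cd.countP (fun c => decide (x > c)) : Int)) :: ms
              = (pre ++ [m - 2 * (cd.countP (fun c => decide (x > c)) : Int)]) ++ ms by simp]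
        rw [this]
        simp

-- a boundary r with everything below it < b and everything from it ≥ b pins the count of (· < b)
lemma countP_eq_of_boundary (l : List Int) (b : Int) (r : Nat) (hr : r ≤ l.length)
    (h1 : ∀ (j : Nat) (hj : j < l.length), j < r → l[j] < b)
    (h2 : ∀ (j : Nat) (hj : j < l.length), r ≤ j → b ≤ l[j]) :
    l.countP (fun c => decide (c < b)) = r := by
  have hsplit := List.take_append_drop r l
  calc l.countP (fun c => decide (c < b))
      = ((l.take r) ++ (l.drop r)).countP (fun c => decide (c < b)) := by rw [hsplit]
    _ = (l.take r).countP (fun c => decide (c < b)) + (l.drop r).countP (fun c => decide (c < b)) := List.countP_append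
    _ = r := by
        have ht : (l.take r).countP (fun c => decide (c < b)) = r := by
          rw [List.countP_eq_length.mpr]
          · simp [Nat.min_eq_left hr]
          · intro a ha
            obtain ⟨j, hj, rfl⟩ := List.mem_iff_getElem.mp ha
            have hj' : j < r ∧ j < l.length := by simpa using hj
            simp only [List.getElem_take]
            exact decide_eq_true (h1 j hj'.2 hj'.1)
        have hd : (l.drop r).countP (fun c => decide (c < b)) = 0 := by
          rw [List.countP_eq_zero.mpr]
          intro a ha
          obtain ⟨j, hj, rfl⟩ := List.mem_iff_getElem.mp ha
          simp only [List.getElem_drop]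
          have := h2 (r + j) (by simp at hj; omega) (Nat.le_add_right _ _)
          simpa using not_lt.mpr this
        omega

-- bisect_left on sorted(contracting_dims) is exactly A's count of contracting dims below b
lemma bisect_eq_count (cd : List Int) (b : Int) :
    ((PySem.List.bisectLeft (PySem.List.sorted cd (fun x => x) false) b : Nat) : Int)
      = (cd.countP (fun c => decide (b > c)) : Int) := by
  set cs := PySem.List.sorted cd (fun x => x) false with hcs
  have hpw : cs.Pairwise (fun a b => a ≤ b) := by
    simpa using PySem.List.sorted_pairwise cd (fun x => x)
  obtain ⟨hle, hlt, hge⟩ := PySem.List.bisectLeft_spec cs b hpw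
  have hcount : cs.countP (fun c => decide (c < b)) = PySem.List.bisectLeft cs b :=
    countP_eq_of_boundary cs b _ hle hlt hge
  have hperm : cs.Perm cd := PySem.List.sorted_perm cd (fun x => x) false
  have h : PySem.List.bisectLeft cs b = cd.countP (fun c => decide (b > c)) := by
    rw [← hcount, show (fun c : Int => decide (b > c)) = (fun c : Int => decide (c < b)) from rfl]
    exact hperm.countP_eq _
  exact_mod_cast congrArg (fun n : Nat => (n : Int)) h

-- ===== VERDICT (by name: the statement is the Claim_ definition above) =====
theorem get_res_batch_dims_spec : Claim_equal_get_res_batch_dims := by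
  intro cd bd _
  show get_res_batch_dims cd bd = get_res_batch_dims_alt cd bd
  have hA : get_res_batch_dims cd bd =
      (PySem.List.enumerate bd (([] : List Int).length : Int)).foldl
        (fun res p =>
          cd.foldl
            (fun r c => if p.2 > c then r.set p.1.toNat (r.getD p.1.toNat 0 - 2) else r) res)
        ([] ++ (PySem.List.enumerate bd (([] : List Int).length : Int)).map (fun p => 2 * p.2 - p.1)) := rfl
  have hB : get_res_batch_dims_alt cd bd =
      (PySem.List.enumerate bd (([] : List Int).length : Int)).map
        (fun p => 2 * p.2 - p.1 - 2 * ((PySem.List.bisectLeft (PySem.List.sorted cd (fun x => x) false) p.2 : Nat) : Int)) := rfl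
  rw [hA, hB]
  rw [outer_foldl cd bd [] ((PySem.List.enumerate bd (([] : List Int).length : Int)).map (fun p => 2 * p.2 - p.1))
        (by simp [PySem.List.length_enumerate])]
  apply List.ext_getElem
  · simp [PySem.List.length_enumerate]
  · intro j hj1 hj2
    have hjb : j < bd.length := by simpa [PySem.List.length_enumerate] using hj2
    simp only [List.nil_append, List.getElem_map, List.getElem_zip, PySem.List.getElem_enumerate]
    rw [← bisect_eq_count cd bd[j]]
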